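-- pv_equiv track=rewrite | github.com/emielsteegh/advent-of-code | 03_script.py | calc_backpack_priority_1
-- ===== SOURCE A (Python) =====
-- priority = 'abcdefghijklmnopqrstuvwxyzABCDEFGHIJKLMNOPQRSTUVWXYZ'
--
-- def get_priority(ch):
--     return priority.index(ch)+1
--
-- def calc_backpack_priority_1(content):
--     backpack_size = len(content)
--     half_backpack = int(backpack_size/2) # always divisible by 2
--
--     comp_a = set(content[:half_backpack])
--     comp_b = set(content[half_backpack:])
--     intersect = comp_a.intersection(comp_b)
--
--     backpack_priority = 0
--     for ch in intersect:
--         backpack_priority += get_priority(ch)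
--
--     return backpack_priority
-- ===== SOURCE B (Python) =====
-- priority = 'abcdefghijklmnopqrstuvwxyzABCDEFGHIJKLMNOPQRSTUVWXYZ'
--
-- def calc_backpack_priority_1(content):
--     half = len(content) // 2
--     a, b = content[:half], content[half:]
--     return sum(i + 1 for i, ch in enumerate(priority) if ch in a and ch in b)
-- ===== Notes on version B (the rewrite author's own statement) =====
-- stated objective: idiomatic
-- what changed: Instead of building two sets and intersecting them, B scans the fixed 52-letter priority alphabet once with enumerate and adds i+1 whenever the letter occurs in both halves, so the priority comes from the enumeration index and the ValueError-prone priority.index lookup disappears.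
import Mathlib
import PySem

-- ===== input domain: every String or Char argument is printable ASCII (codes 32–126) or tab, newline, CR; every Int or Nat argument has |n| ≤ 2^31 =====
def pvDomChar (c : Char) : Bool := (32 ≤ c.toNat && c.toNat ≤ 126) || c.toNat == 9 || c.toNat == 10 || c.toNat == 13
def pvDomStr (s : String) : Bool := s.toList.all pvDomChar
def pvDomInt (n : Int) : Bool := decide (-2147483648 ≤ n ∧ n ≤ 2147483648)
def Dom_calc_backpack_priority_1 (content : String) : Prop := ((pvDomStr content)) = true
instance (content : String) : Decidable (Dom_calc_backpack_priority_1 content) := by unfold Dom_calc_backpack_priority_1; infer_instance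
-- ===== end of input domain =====

-- B scans the fixed 52-letter alphabet instead of building and intersecting two sets (idiomatic, no speed claim).

-- ===== PORT A =====
def priorityChars : List Char :=
  "abcdefghijklmnopqrstuvwxyzABCDEFGHIJKLMNOPQRSTUVWXYZ".toList

-- priority.index(ch) raises ValueError when ch is absent; Pre_ excludes those inputs,
-- so the .getD default is never reached inside Pre_.
def get_priority (ch : Char) : Int :=
  (((PySem.List.index? priorityChars ch).getD 0 : Nat) : Int) + 1

def calc_backpack_priority_1 (content : String) : Int :=
  let cs := content.toList
  let backpack_size := cs.length
  -- int(backpack_size/2): exact for every realistic length (< 2^52), ported as Nat division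
  let half_backpack := backpack_size / 2
  let comp_a := PySem.Set.ofList (PySem.List.slice cs none (some (half_backpack : Int)))
  let comp_b := PySem.Set.ofList (PySem.List.slice cs (some (half_backpack : Int)) none)
  let intersect := PySem.Set.inter comp_a comp_b
  intersect.foldl (fun acc ch => acc + get_priority ch) 0

-- ===== PORT B =====
def calc_backpack_priority_1_alt (content : String) : Int :=
  let cs := content.toList
  let half := cs.length / 2
  let a := PySem.List.slice cs none (some (half : Int))
  let b := PySem.List.slice cs (some (half : Int)) none
  -- sum(i + 1 for i, ch in enumerate(priority) if ch in a and ch in b)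
  -- ('ch in a' on strings is membership here since ch is a single character)
  (PySem.List.enumerate priorityChars 0).foldl
    (fun acc p => if a.contains p.2 && b.contains p.2 then acc + (p.1 + 1) else acc) 0

-- ===== PRECONDITION & SPEC =====
-- Pre_ excludes exactly the inputs where A raises ValueError: a character occurring in
-- both halves that is not one of the 52 ASCII letters.
def Pre_calc_backpack_priority_1 (content : String) : Prop :=
  ((content.toList.take (content.toList.length / 2)).all (fun c =>
    !(content.toList.drop (content.toList.length / 2)).contains c
      || ("abcdefghijklmnopqrstuvwxyzABCDEFGHIJKLMNOPQRSTUVWXYZ".toList.contains c))) = true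
instance (content : String) : Decidable (Pre_calc_backpack_priority_1 content) := by
  unfold Pre_calc_backpack_priority_1; infer_instance
def pvWitness_calc_backpack_priority_1 : String := "vJrwpWtwJgWrhcsFMMfFFhFp"

def Spec_calc_backpack_priority_1 (content : String) (out : Int) : Prop :=
  out = calc_backpack_priority_1_alt content
instance (content : String) (out : Int) : Decidable (Spec_calc_backpack_priority_1 content out) := by
  unfold Spec_calc_backpack_priority_1; infer_instance

-- ===== CLAIM (what is proved, stated in full; the proofs are below) =====
def Claim_equal_calc_backpack_priority_1 : Prop :=
  ∀ (content : String), Dom_calc_backpack_priority_1 content →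
    Pre_calc_backpack_priority_1 content →
      Spec_calc_backpack_priority_1 content (calc_backpack_priority_1 content)

-- ===== LEMMAS AND PROOFS =====

-- a fold adding f over a list is the sum of the mapped list
theorem foldl_add_map (xs : List Char) (f : Char → Int) (a : Int) :
    xs.foldl (fun acc ch => acc + f ch) a = a + (xs.map f).sum := by
  induction xs generalizing a with
  | nil => simp
  | cons x t ih => simp [List.foldl_cons, ih, add_assoc]

-- a guarded fold is the sum over the filtered list
theorem foldl_if_add {α : Type} (xs : List α) (c : α → Bool) (g : α → Int) (a : Int) :
    xs.foldl (fun acc x => if c x then acc + g x else acc) a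
      = a + ((xs.filter c).map g).sum := by
  induction xs generalizing a with
  | nil => simp
  | cons x t ih =>
    by_cases h : c x <;> simp [List.foldl_cons, h, ih, add_assoc]

-- filtering an enumeration by a predicate on the element
theorem enum_filter_map (P : List Char) (c : Char → Bool) (f : Char → Int) :
    ∀ (s : Int), (∀ i ch, (i, ch) ∈ PySem.List.enumerate P s → f ch = i + 1) →
      ((PySem.List.enumerate P s).filter (fun p => c p.2)).map (fun p => p.1 + 1)
        = (P.filter c).map f := by
  induction P with
  | nil => intro s _; simp [PySem.List.enumerate_nil]
  | cons x t ih =>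
    intro s hf
    have ht := ih (s + 1) (fun i ch hm => hf i ch (by simp [PySem.List.enumerate_cons, hm]))
    have hx := hf s x (by simp [PySem.List.enumerate_cons])
    rw [PySem.List.enumerate_cons]
    by_cases h : c x
    · simp [h, ht, hx]
    · simp [h, ht]

theorem priority_nodup : priorityChars.Nodup := by decide

theorem get_priority_enum :
    ∀ p ∈ PySem.List.enumerate priorityChars 0, get_priority p.2 = p.1 + 1 := by
  decide

-- ===== VERDICT (by name: the statement is the Claim_ definition above) =====
theorem calc_backpack_priority_1_spec : Claim_equal_calc_backpack_priority_1 := by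
  intro content _ htpre
  have hpre : ∀ c ∈ content.toList.take (content.toList.length / 2),
      c ∈ content.toList.drop (content.toList.length / 2) → c ∈ priorityChars := by
    intro c hc1 hc2
    have h := List.all_eq_true.mp htpre c hc1
    simp only [Bool.or_eq_true, Bool.not_eq_true',
      List.contains_eq_mem, decide_eq_true_eq, decide_eq_false_iff_not] at h
    rcases h with h | h
    · exact absurd hc2 h
    · exact h
  unfold Spec_calc_backpack_priority_1
  unfold calc_backpack_priority_1 calc_backpack_priority_1_alt
  simp only []
  set cs := content.toList with hcs
  set half := cs.length / 2 with hhalf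
  have hsl1 : PySem.List.slice cs none (some ((half : Nat) : Int)) = cs.take half :=
    PySem.List.slice_to_natCast cs half
  have hsl2 : PySem.List.slice cs (some ((half : Nat) : Int)) none = cs.drop half :=
    PySem.List.slice_from_natCast cs half
  rw [hsl1, hsl2]
  set A := cs.take half with hA
  set B := cs.drop half with hB
  set c : Char → Bool := fun ch => A.contains ch && B.contains ch with hc
  -- A side: fold over the intersection = sum over its map
  rw [foldl_add_map, foldl_if_add, enum_filter_map priorityChars c get_priority 0
    (fun i ch hm => get_priority_enum (i, ch) hm)]
  simp only [zero_add]
  -- the intersection list is a permutation of the alphabet filtered by c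
  have hL : (PySem.Set.inter (PySem.Set.ofList A) (PySem.Set.ofList B)).Perm
      (priorityChars.filter c) := by
    apply (List.perm_ext_iff_of_nodup ?_ ?_).mpr
    · intro x
      constructor
      · intro hx
        have hx' := (PySem.Set.mem_inter (PySem.Set.ofList A) (PySem.Set.ofList B) x).mp hx
        have hxa : x ∈ A := (PySem.Set.mem_ofList A x).mp hx'.1
        have hxb : x ∈ B := (PySem.Set.mem_ofList B x).mp hx'.2
        have hxp : x ∈ priorityChars := hpre x (by rw [hA, hhalf] at hxa; exact hxa)
          (by rw [hB, hhalf] at hxb; exact hxb)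
        refine List.mem_filter.mpr ⟨hxp, ?_⟩
        simp [hc, hxa, hxb]
      · intro hx
        have ⟨hxp, hcx⟩ := List.mem_filter.mp hx
        simp only [hc, Bool.and_eq_true, List.contains_iff_mem] at hcx
        exact (PySem.Set.mem_inter _ _ _).mpr ⟨(PySem.Set.mem_ofList A x).mpr hcx.1,
          (PySem.Set.mem_ofList B x).mpr hcx.2⟩
    · exact PySem.Set.nodup_inter _ _ (PySem.Set.nodup_ofList A)
    · exact priority_nodup.filter c
  exact (hL.map get_priority).sum_eq
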